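-- pv_equiv track=rewrite | github.com/navetech/work | quadrado-magico/quadrado-magico.py | build_estim_vals_permuts2
-- ===== SOURCE A (Python) =====
-- import itertools
--
-- def build_permutations(iterable, permut_length):
--     """
--     Build permutations
--     """
--
--     permuts = []
--
--     if permut_length > 1:
--         # permuts = list(itertools.permutations(iterable, permut_length))
--         permuts = itertools.permutations(iterable, permut_length)
--
--     elif permut_length == 1:
--         for elem in iterable:
--             permuts.append([elem])
--
--     return permuts
--
-- def build_estim_vals_permuts2(estim_vals, num_estim_vals_equations, line_length, line_sum, num_def_lines):
--     """
--     Build estimated values permutations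
--     """
--
--     permuts = []
--
--     if num_def_lines < 1:
--         permut_length = line_length
--
--         permuts = build_permutations(estim_vals, permut_length)
--
--         valid_permuts = []
--
--         for permut in permuts:
--             invalid_permut = False
--             permut_sum = 0
--
--             for value in permut:
--                 permut_sum += value
--
--                 if permut_sum > line_sum:
--                     invalid_permut = True
--                     break
--
--             if (not invalid_permut) and (permut_sum == line_sum):
--                 valid_permuts.append(permut)
--
--         permut_length = num_estim_vals_equations // line_length
--
--         permuts = build_permutations(valid_permuts, permut_length)
--
--     else:
--         permut_length = num_estim_vals_equations // line_length
--
--         permuts = build_permutations(estim_vals, permut_length)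
--
--         valid_permuts = []
--
--         for permut in permuts:
--             invalid_permut = False
--             permut_sum = 0
--
--             for value in permut:
--                 permut_sum += value
--
--                 if permut_sum > line_sum:
--                     invalid_permut = True
--                     break
--
--             if (not invalid_permut):
--                 valid_permuts.append(permut)
--
--         permut_length = line_length
--
--         permuts = build_permutations(valid_permuts, permut_length)
--
--
--     return permuts
-- ===== SOURCE B (Python) =====
-- import itertools
--
--
-- def _dfs(k, vals, s, line_sum, need_exact):
--     """Length-k permutations of vals (k >= 1), built by backtracking: a branch
--     whose running sum exceeds line_sum is pruned immediately; with need_exact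
--     only permutations whose total equals line_sum are kept."""
--     out = []
--     for i in range(len(vals)):
--         t = s + vals[i]
--         if t > line_sum:
--             continue
--         if k == 1:
--             if (not need_exact) or t == line_sum:
--                 out.append([vals[i]])
--         else:
--             for tail in _dfs(k - 1, vals[:i] + vals[i + 1:], t, line_sum, need_exact):
--                 out.append([vals[i]] + tail)
--     return out
--
--
-- def build_estim_vals_permuts2(estim_vals, num_estim_vals_equations, line_length, line_sum, num_def_lines):
--     q = num_estim_vals_equations // line_length
--     if num_def_lines < 1:
--         k1, k2, need_exact = line_length, q, True
--     else:
--         k1, k2, need_exact = q, line_length, False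
--     valid = _dfs(k1, estim_vals, 0, line_sum, need_exact) if k1 >= 1 else []
--     if k2 > 1:
--         return list(itertools.permutations(valid, k2))
--     if k2 == 1:
--         return [[p] for p in valid]
--     return []
-- ===== Notes on version B (the rewrite author's own statement) =====
-- stated objective: alternative
-- what changed: The first stage no longer materialises every length-k permutation and filters it afterwards: B backtracks over index choices, pruning a whole subtree as soon as the running prefix sum exceeds line_sum, and A's two near-duplicate branches are folded into one parametrised pass (k1, k2, need_exact).
import Mathlib
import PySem

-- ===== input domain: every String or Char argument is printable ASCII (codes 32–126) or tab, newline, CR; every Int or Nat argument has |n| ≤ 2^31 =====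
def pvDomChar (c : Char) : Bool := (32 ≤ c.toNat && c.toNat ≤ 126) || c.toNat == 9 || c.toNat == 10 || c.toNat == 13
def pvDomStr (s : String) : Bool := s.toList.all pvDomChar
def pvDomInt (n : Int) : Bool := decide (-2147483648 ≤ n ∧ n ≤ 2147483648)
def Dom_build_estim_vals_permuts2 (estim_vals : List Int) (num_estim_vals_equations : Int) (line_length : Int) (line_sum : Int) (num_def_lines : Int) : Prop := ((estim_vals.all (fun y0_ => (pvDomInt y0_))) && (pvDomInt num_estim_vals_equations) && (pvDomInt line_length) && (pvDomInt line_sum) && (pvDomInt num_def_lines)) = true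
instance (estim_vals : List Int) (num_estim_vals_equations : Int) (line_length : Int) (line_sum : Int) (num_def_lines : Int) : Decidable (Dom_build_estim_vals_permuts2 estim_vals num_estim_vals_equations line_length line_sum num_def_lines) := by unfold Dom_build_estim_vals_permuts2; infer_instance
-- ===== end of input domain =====

-- ===== PORT A =====
-- B replaces A's generate-all-then-filter first stage by a pruned backtracking search over index choices (objective: alternative algorithm; speed not measured).

-- port of build_permutations (exact: itertools.permutations is PySem.List.permutations; r <= 0 gives [])
def pvBuildPerms {a : Type} (iterable : List a) (permut_length : Int) : List (List a) :=
  if 1 < permut_length then PySem.List.permutations iterable permut_length.toNat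
  else if permut_length = 1 then iterable.foldl (fun permuts elem => permuts ++ [[elem]]) []
  else []

-- A's inner for-loop over a permutation with the break: returns (invalid_permut, permut_sum)
def pvScanA (line_sum : Int) : List Int → Int → Bool × Int
  | [], permut_sum => (false, permut_sum)
  | value :: rest, permut_sum =>
    let s := permut_sum + value
    if s > line_sum then (true, s) else pvScanA line_sum rest s

def build_estim_vals_permuts2 (estim_vals : List Int) (num_estim_vals_equations : Int) (line_length : Int) (line_sum : Int) (num_def_lines : Int) : List (List (List Int)) :=
  if num_def_lines < 1 then
    let permuts := pvBuildPerms estim_vals line_length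
    let valid_permuts := permuts.foldl (fun acc permut =>
      let r := pvScanA line_sum permut 0
      if !r.1 && r.2 == line_sum then acc ++ [permut] else acc) []
    pvBuildPerms valid_permuts (PySem.Int.floordiv num_estim_vals_equations line_length)
  else
    let permuts := pvBuildPerms estim_vals (PySem.Int.floordiv num_estim_vals_equations line_length)
    let valid_permuts := permuts.foldl (fun acc permut =>
      let r := pvScanA line_sum permut 0
      if !r.1 then acc ++ [permut] else acc) []
    pvBuildPerms valid_permuts line_length

-- ===== PORT B =====
-- Source B's `for i in range(len(vals))` with `vals[:i] + vals[i+1:]`: the list of (vals[i], vals with i removed)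
def pvPicks : List Int → List Int → List (Int × List Int)
  | _, [] => []
  | pre, v :: rs => (v, pre ++ rs) :: pvPicks (pre ++ [v]) rs

-- Source B's _dfs (k ≥ 1 maintained by the caller; the 0 case is a totality guard, never reached)
def pvDfs (ex : Bool) (ls : Int) : Nat → List Int → Int → List (List Int)
  | 0, _, _ => []
  | k' + 1, vals, s =>
    (pvPicks [] vals).foldl (fun out vr =>
      let t := s + vr.1
      if t > ls then out
      else if k' = 0 then (if !ex || t == ls then out ++ [[vr.1]] else out)
      else out ++ (pvDfs ex ls k' vr.2 t).map (fun tail => vr.1 :: tail)) []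

def build_estim_vals_permuts2_alt (estim_vals : List Int) (num_estim_vals_equations : Int) (line_length : Int) (line_sum : Int) (num_def_lines : Int) : List (List (List Int)) :=
  let q := PySem.Int.floordiv num_estim_vals_equations line_length
  let k1 := if num_def_lines < 1 then line_length else q
  let k2 := if num_def_lines < 1 then q else line_length
  let need_exact : Bool := num_def_lines < 1
  let valid := if 1 ≤ k1 then pvDfs need_exact line_sum k1.toNat estim_vals 0 else []
  if 1 < k2 then PySem.List.permutations valid k2.toNat
  else if k2 = 1 then valid.map (fun p => [p])
  else []

-- ===== PRECONDITION & SPEC =====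
-- Pre_ excludes line_length == 0, where A raises ZeroDivisionError, and the inputs where A's final
-- build_permutations call takes its r > 1 path (num_def_lines < 1 with num_estim_vals_equations // line_length > 1,
-- otherwise line_length > 1), on which A returns a lazy itertools.permutations iterator object instead of a list
-- (a value outside the declared return type; B returns the materialised list there).
def Pre_build_estim_vals_permuts2 (estim_vals : List Int) (num_estim_vals_equations : Int) (line_length : Int) (line_sum : Int) (num_def_lines : Int) : Prop :=
  line_length ≠ 0 ∧
    (if num_def_lines < 1 then PySem.Int.floordiv num_estim_vals_equations line_length ≤ 1
     else line_length ≤ 1)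
instance (estim_vals : List Int) (num_estim_vals_equations : Int) (line_length : Int) (line_sum : Int) (num_def_lines : Int) : Decidable (Pre_build_estim_vals_permuts2 estim_vals num_estim_vals_equations line_length line_sum num_def_lines) := by unfold Pre_build_estim_vals_permuts2; infer_instance

def pvWitness_build_estim_vals_permuts2 : List Int × Int × Int × Int × Int := ([1, 2], 2, 2, 3, 0)

def Spec_build_estim_vals_permuts2 (estim_vals : List Int) (num_estim_vals_equations : Int) (line_length : Int) (line_sum : Int) (num_def_lines : Int) (out : List (List (List Int))) : Prop := out = build_estim_vals_permuts2_alt estim_vals num_estim_vals_equations line_length line_sum num_def_lines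
instance (estim_vals : List Int) (num_estim_vals_equations : Int) (line_length : Int) (line_sum : Int) (num_def_lines : Int) (out : List (List (List Int))) : Decidable (Spec_build_estim_vals_permuts2 estim_vals num_estim_vals_equations line_length line_sum num_def_lines out) := by unfold Spec_build_estim_vals_permuts2; infer_instance

-- ===== CLAIM (what is proved, stated in full; the proofs are below) =====
def Claim_equal_build_estim_vals_permuts2 : Prop := ∀ (estim_vals : List Int) (num_estim_vals_equations : Int) (line_length : Int) (line_sum : Int) (num_def_lines : Int), Dom_build_estim_vals_permuts2 estim_vals num_estim_vals_equations line_length line_sum num_def_lines → Pre_build_estim_vals_permuts2 estim_vals num_estim_vals_equations line_length line_sum num_def_lines → Spec_build_estim_vals_permuts2 estim_vals num_estim_vals_equations line_length line_sum num_def_lines (build_estim_vals_permuts2 estim_vals num_estim_vals_equations line_length line_sum num_def_lines)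

-- ===== LEMMAS AND PROOFS =====

-- A's keep-condition on a permutation, started at running sum s (ex: the sum must come out equal to ls)
def pvKeep (ex : Bool) (ls s : Int) (p : List Int) : Bool :=
  let r := pvScanA ls p s
  !r.1 && (!ex || r.2 == ls)

theorem pvKeep_nil (ex : Bool) (ls s : Int) : pvKeep ex ls s [] = (!ex || s == ls) := by
  simp [pvKeep, pvScanA]

theorem pvKeep_cons (ex : Bool) (ls s v : Int) (p : List Int) :
    pvKeep ex ls s (v :: p) = if s + v > ls then false else pvKeep ex ls (s + v) p := by
  simp only [pvKeep, pvScanA]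
  split <;> simp

theorem pvPicks_eq (xs : List Int) : ∀ (pre : List Int),
    pvPicks pre xs = (List.range xs.length).map (fun i => (xs.getD i 0, pre ++ xs.eraseIdx i)) := by
  induction xs with
  | nil => intro pre; simp [pvPicks]
  | cons v rs ih =>
    intro pre
    simp only [pvPicks, List.length_cons, List.range_succ_eq_map, List.map_cons, List.map_map]
    refine congrArg₂ _ (by simp) ?_
    rw [ih (pre ++ [v])]
    refine List.map_congr_left fun i _ => ?_
    simp [List.eraseIdx_cons_succ, List.append_assoc]

-- used only to state perms_one without `getElem` side proofs
theorem map_getD_range (xs : List Int) :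
    (List.range xs.length).map (fun i => xs.getD i 0) = xs := by
  induction xs with
  | nil => simp
  | cons v rs ih =>
    simp only [List.length_cons, List.range_succ_eq_map, List.map_cons, List.map_map]
    exact congrArg₂ _ rfl (by simpa using ih)

theorem perms_zero (xs : List Int) : PySem.List.permutations xs 0 = [[]] := by
  simp [PySem.List.permutations]

theorem perms_succ (xs : List Int) (k : Nat) :
    PySem.List.permutations xs (k + 1) = (List.range xs.length).flatMap
      (fun i => match xs[i]? with
        | none => []
        | some v => (PySem.List.permutations (xs.eraseIdx i) k).map (v :: ·)) := by
  rw [PySem.List.permutations]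
  refine List.flatMap_congr fun i _ => ?_
  cases xs[i]? <;> rfl

theorem perms_one (xs : List Int) :
    PySem.List.permutations xs 1 = xs.map (fun e => [e]) := by
  rw [perms_succ]
  have h : ∀ i ∈ List.range xs.length,
      (match xs[i]? with
        | none => ([] : List (List Int))
        | some v => (PySem.List.permutations (xs.eraseIdx i) 0).map (v :: ·))
        = [[xs.getD i 0]] := by
    intro i hi
    rw [List.mem_range] at hi
    rw [List.getElem?_eq_getElem hi]
    simp [PySem.List.permutations, List.getD, List.getElem?_eq_getElem hi]
  rw [List.flatMap_congr h]
  calc (List.range xs.length).flatMap (fun i => [[xs.getD i 0]])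
      = (List.range xs.length).map (fun i => [xs.getD i 0]) := by
        rw [← List.map_eq_flatMap]
    _ = ((List.range xs.length).map (fun i => xs.getD i 0)).map (fun e => [e]) := by
        simp [List.map_map]
    _ = xs.map (fun e => [e]) := by rw [map_getD_range]

-- the body of Source B's loop, as a block appended per pick
def pvBlock (ex : Bool) (ls : Int) (k' : Nat) (s : Int) (vr : Int × List Int) : List (List Int) :=
  let t := s + vr.1
  if t > ls then []
  else if k' = 0 then (if !ex || t == ls then [[vr.1]] else [])
  else (pvDfs ex ls k' vr.2 t).map (fun tail => vr.1 :: tail)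

theorem pvDfs_succ (ex : Bool) (ls : Int) (k' : Nat) (vals : List Int) (s : Int) :
    pvDfs ex ls (k' + 1) vals s = (pvPicks [] vals).flatMap (pvBlock ex ls k' s) := by
  show List.foldl _ _ _ = _
  have hbody : (fun (out : List (List Int)) (vr : Int × List Int) =>
      let t := s + vr.1
      if t > ls then out
      else if k' = 0 then (if !ex || t == ls then out ++ [[vr.1]] else out)
      else out ++ (pvDfs ex ls k' vr.2 t).map (fun tail => vr.1 :: tail))
      = (fun out vr => out ++ pvBlock ex ls k' s vr) := by
    funext out vr
    simp only [pvBlock]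
    split_ifs <;> simp
  rw [hbody, PySem.List.foldl_append_eq_flatMap, List.nil_append]

theorem pvDfs_eq (ex : Bool) (ls : Int) : ∀ (k : Nat) (vals : List Int) (s : Int),
    pvDfs ex ls (k + 1) vals s = (PySem.List.permutations vals (k + 1)).filter (pvKeep ex ls s) := by
  intro k
  induction k with
  | zero =>
    intro vals s
    rw [pvDfs_succ, pvPicks_eq, List.flatMap_map, perms_succ, List.filter_flatMap]
    refine List.flatMap_congr fun i hi => ?_
    rw [List.mem_range] at hi
    rw [List.getElem?_eq_getElem hi]
    simp only [pvBlock, List.getD_eq_getElem _ _ hi, List.nil_append, perms_zero,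
      List.map_cons, List.map_nil, List.filter_cons, List.filter_nil, pvKeep_cons, pvKeep_nil]
    by_cases h : s + vals[i] > ls
    · simp [h]
    · simp [h]
  | succ k ih =>
    intro vals s
    rw [pvDfs_succ, pvPicks_eq, List.flatMap_map, perms_succ, List.filter_flatMap]
    refine List.flatMap_congr fun i hi => ?_
    rw [List.mem_range] at hi
    rw [List.getElem?_eq_getElem hi]
    simp only [pvBlock, List.getD_eq_getElem _ _ hi, List.nil_append]
    by_cases h : s + vals[i] > ls
    · rw [if_pos h]
      rw [eq_comm, List.filter_eq_nil_iff]
      intro p hp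
      rw [List.mem_map] at hp
      obtain ⟨q, _, rfl⟩ := hp
      simp [pvKeep_cons, h]
    · rw [if_neg h, if_neg (Nat.succ_ne_zero k), ih]
      rw [List.filter_map]
      refine congrArg _ (List.filter_congr fun p _ => ?_)
      simp [Function.comp, pvKeep_cons, h]

-- A's foldl-with-append filter pass, as List.filter
theorem foldl_keep (ls : Int) (ex : Bool) (l : List (List Int)) :
    l.foldl (fun acc permut => if pvKeep ex ls 0 permut then acc ++ [permut] else acc) []
      = l.filter (pvKeep ex ls 0) := by
  rw [PySem.List.foldl_append_if (pvKeep ex ls 0) (fun p => p) l []]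
  simp

-- A's first stage (build + filter) equals B's guarded pruned DFS
theorem stage1_eq (ev : List Int) (k ls : Int) (ex : Bool) :
    (pvBuildPerms ev k).foldl (fun acc permut => if pvKeep ex ls 0 permut then acc ++ [permut] else acc) []
      = (if 1 ≤ k then pvDfs ex ls k.toNat ev 0 else []) := by
  rw [foldl_keep]
  by_cases h1 : 1 < k
  · obtain ⟨m, hm⟩ : ∃ m, k.toNat = m + 1 := ⟨k.toNat - 1, by omega⟩
    rw [if_pos (le_of_lt h1), pvBuildPerms, if_pos h1, hm, pvDfs_eq]
  by_cases h2 : k = 1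
  · subst h2
    rw [if_pos le_rfl, pvBuildPerms, if_neg h1, if_pos rfl]
    rw [PySem.List.foldl_append_singleton_eq_map (fun elem => [elem]) ev []]
    rw [List.nil_append, ← perms_one]
    exact (pvDfs_eq ex ls 0 ev 0).symm
  · rw [if_neg (by omega), pvBuildPerms, if_neg h1, if_neg h2]
    simp

-- A's second stage (build_permutations on the surviving list) equals B's final if-chain
theorem stage2_eq (valid : List (List Int)) (k : Int) :
    pvBuildPerms valid k = (if 1 < k then PySem.List.permutations valid k.toNat
      else if k = 1 then valid.map (fun p => [p]) else []) := by
  rw [pvBuildPerms]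
  split_ifs with h1 h2
  · rfl
  · rw [PySem.List.foldl_append_singleton_eq_map (fun elem => [elem]) valid []]
    simp
  · rfl

theorem main_eq (estim_vals : List Int) (num_estim_vals_equations line_length line_sum num_def_lines : Int) :
    build_estim_vals_permuts2 estim_vals num_estim_vals_equations line_length line_sum num_def_lines
      = build_estim_vals_permuts2_alt estim_vals num_estim_vals_equations line_length line_sum num_def_lines := by
  unfold build_estim_vals_permuts2 build_estim_vals_permuts2_alt
  by_cases hn : num_def_lines < 1
  · simp only [if_pos hn, decide_eq_true hn]
    have hpred : (fun (acc : List (List Int)) (permut : List Int) =>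
        let r := pvScanA line_sum permut 0
        if !r.1 && r.2 == line_sum then acc ++ [permut] else acc)
        = (fun acc permut => if pvKeep true line_sum 0 permut then acc ++ [permut] else acc) := by
      funext acc permut
      simp [pvKeep]
    rw [hpred, stage1_eq, stage2_eq]
  · simp only [if_neg hn, decide_eq_false hn]
    have hpred : (fun (acc : List (List Int)) (permut : List Int) =>
        let r := pvScanA line_sum permut 0
        if !r.1 then acc ++ [permut] else acc)
        = (fun acc permut => if pvKeep false line_sum 0 permut then acc ++ [permut] else acc) := by
      funext acc permut
      simp [pvKeep]
    rw [hpred, stage1_eq, stage2_eq]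

-- ===== VERDICT (by name: the statement is the Claim_ definition above) =====
theorem build_estim_vals_permuts2_spec : Claim_equal_build_estim_vals_permuts2 := by
  intro estim_vals num_estim_vals_equations line_length line_sum num_def_lines _ _
  exact main_eq estim_vals num_estim_vals_equations line_length line_sum num_def_lines
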